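-- pv_equiv track=rewrite | github.com/linzhiqiu/leco | train_for_more_tps.py | get_num_of_classes
-- ===== SOURCE A (Python) =====
-- def get_num_of_classes(leaf_idx_to_all_class_idx):
--     num_of_classes = []
--     levels = len(leaf_idx_to_all_class_idx[0])
--     for tp_idx in range(levels):
--         childs = set()
--         for leaf_idx in leaf_idx_to_all_class_idx:
--             child = leaf_idx_to_all_class_idx[leaf_idx][tp_idx]
--             childs.add(child)
--         num_child = len(childs)
--         num_of_classes.append(num_child)
--     return num_of_classes
-- ===== SOURCE B (Python) =====
-- def get_num_of_classes(leaf_idx_to_all_class_idx):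
--     rows = list(leaf_idx_to_all_class_idx.values())
--     levels = len(leaf_idx_to_all_class_idx[0])
--     result = []
--     for tp_idx in range(levels):
--         col = sorted(r[tp_idx] for r in rows)
--         n = 0
--         prev = None
--         for v in col:
--             if prev is None or v != prev:
--                 n += 1
--             prev = v
--         result.append(n)
--     return result
-- ===== Notes on version B (the rewrite author's own statement) =====
-- stated objective: alternative
-- what changed: B replaces A's per-level set accumulation (with a dict lookup per leaf) by a sort-then-scan: for each level it sorts the column of class indices and counts value runs with an adjacent-change scan, using no set at all; Pre_ excludes inputs where A raises (key 0 absent -> KeyError, some row shorter than row 0 -> IndexError) and requires the distinct keys every real dict has.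
import Mathlib
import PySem

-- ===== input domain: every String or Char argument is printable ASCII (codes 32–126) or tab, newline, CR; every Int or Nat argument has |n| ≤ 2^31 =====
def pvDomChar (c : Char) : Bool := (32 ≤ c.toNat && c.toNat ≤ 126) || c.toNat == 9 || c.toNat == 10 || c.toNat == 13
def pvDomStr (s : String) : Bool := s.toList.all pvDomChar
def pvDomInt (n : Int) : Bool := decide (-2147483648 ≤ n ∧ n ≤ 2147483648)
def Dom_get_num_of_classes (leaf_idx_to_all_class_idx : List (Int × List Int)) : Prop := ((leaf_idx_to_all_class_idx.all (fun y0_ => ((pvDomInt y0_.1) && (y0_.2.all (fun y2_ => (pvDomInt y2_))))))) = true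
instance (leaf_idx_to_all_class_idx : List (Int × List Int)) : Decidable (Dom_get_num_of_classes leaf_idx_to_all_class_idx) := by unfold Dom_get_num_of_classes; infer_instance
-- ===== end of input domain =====

-- B counts the distinct entries of each level by sorting the column and counting value runs
-- (adjacent-change scan), instead of A's per-level set building with a dict lookup per leaf. Same task, different algorithm.


-- dict access d[k]: first matching entry (exact, since Pre_ requires the keys to be distinct
-- and k to be present — Python would raise KeyError when absent)
def pyLookup (d : List (Int × List Int)) (k : Int) : List Int :=
  ((d.find? (fun p => p.1 == k)).map Prod.snd).getD []

-- ===== PORT A =====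
def get_num_of_classes (leaf_idx_to_all_class_idx : List (Int × List Int)) : List Int :=
  let levels : Int := ((pyLookup leaf_idx_to_all_class_idx 0).length : Int)
  (PySem.List.pyRange 0 levels 1).foldl (fun num_of_classes tp_idx =>
    let childs :=
      leaf_idx_to_all_class_idx.foldl (fun childs p =>
        PySem.Set.add childs (PySem.List.pyGetD (pyLookup leaf_idx_to_all_class_idx p.1) tp_idx 0))
        ([] : List Int)
    num_of_classes ++ [(childs.length : Int)]) []

-- ===== PORT B =====
-- the inner 'n = 0; prev = None; for v in col: if prev is None or v != prev: n += 1; prev = v'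
def countRuns (col : List Int) : Int :=
  (col.foldl
    (fun (st : Int × Option Int) v =>
      (if st.2 = none ∨ st.2 ≠ some v then st.1 + 1 else st.1, some v))
    ((0 : Int), (none : Option Int))).1

def get_num_of_classes_alt (leaf_idx_to_all_class_idx : List (Int × List Int)) : List Int :=
  let rows := leaf_idx_to_all_class_idx.map Prod.snd
  let levels : Int := ((pyLookup leaf_idx_to_all_class_idx 0).length : Int)
  (PySem.List.pyRange 0 levels 1).foldl (fun result tp_idx =>
    let col := PySem.List.sorted (rows.map (fun r => PySem.List.pyGetD r tp_idx 0)) (fun x => x) false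
    result ++ [countRuns col]) []

-- ===== PRECONDITION & SPEC =====
-- Pre_ excludes inputs on which A raises: key 0 absent (KeyError) or some row shorter than row 0
-- (IndexError). Distinct keys are inherent to the dict argument (no Python dict violates it).
def Pre_get_num_of_classes (leaf_idx_to_all_class_idx : List (Int × List Int)) : Prop :=
  (leaf_idx_to_all_class_idx.map Prod.fst).Nodup ∧
  (0 : Int) ∈ leaf_idx_to_all_class_idx.map Prod.fst ∧
  ∀ p ∈ leaf_idx_to_all_class_idx, p.1 = 0 →
    ∀ q ∈ leaf_idx_to_all_class_idx, p.2.length ≤ q.2.length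
instance (leaf_idx_to_all_class_idx : List (Int × List Int)) : Decidable (Pre_get_num_of_classes leaf_idx_to_all_class_idx) := by unfold Pre_get_num_of_classes; infer_instance

def pvWitness_get_num_of_classes : (List (Int × List Int)) := [(0, [1, 2]), (1, [1, 3])]

def Spec_get_num_of_classes (leaf_idx_to_all_class_idx : List (Int × List Int)) (out : List Int) : Prop := out = get_num_of_classes_alt leaf_idx_to_all_class_idx
instance (leaf_idx_to_all_class_idx : List (Int × List Int)) (out : List Int) : Decidable (Spec_get_num_of_classes leaf_idx_to_all_class_idx out) := by unfold Spec_get_num_of_classes; infer_instance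

-- ===== CLAIM (what is proved, stated in full; the proofs are below) =====
def Claim_equal_get_num_of_classes : Prop := ∀ (leaf_idx_to_all_class_idx : List (Int × List Int)), Dom_get_num_of_classes leaf_idx_to_all_class_idx → Pre_get_num_of_classes leaf_idx_to_all_class_idx → Spec_get_num_of_classes leaf_idx_to_all_class_idx (get_num_of_classes leaf_idx_to_all_class_idx)

-- ===== LEMMAS AND PROOFS =====
theorem pyLookup_self (d : List (Int × List Int)) (hnd : (d.map Prod.fst).Nodup)
    (p : Int × List Int) (hp : p ∈ d) : pyLookup d p.1 = p.2 := by
  induction d with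
  | nil => cases hp
  | cons hd tl ih =>
    rcases List.mem_cons.1 hp with rfl | hp'
    · simp only [pyLookup]
      rw [List.find?_cons_of_pos (by simp)]
      rfl
    · have hne : hd.1 ≠ p.1 := by
        intro h
        have : hd.1 ∈ tl.map Prod.fst := h ▸ List.mem_map.2 ⟨p, hp', rfl⟩
        exact (List.nodup_cons.1 (by simpa using hnd)).1 this
      simp only [pyLookup]
      rw [List.find?_cons_of_neg (by simp [hne])]
      exact ih (List.nodup_cons.1 (by simpa using hnd)).2 hp'

-- the run-count scan, in structural form (prev carried explicitly)
def countAux (prev : Option Int) : List Int → Nat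
  | [] => 0
  | v :: t => (if prev = some v then 0 else 1) + countAux (some v) t

theorem countRuns_foldl (col : List Int) :
    ∀ (n : Int) (prev : Option Int),
    (col.foldl
      (fun (st : Int × Option Int) v =>
        (if st.2 = none ∨ st.2 ≠ some v then st.1 + 1 else st.1, some v))
      (n, prev)).1 = n + (countAux prev col : Int) := by
  induction col with
  | nil => intro n prev; simp [countAux]
  | cons v t ih =>
    intro n prev
    simp only [List.foldl_cons, countAux]
    cases prev with
    | none => rw [ih]; simp; ring
    | some p =>
      by_cases h : p = v
      · subst h; rw [ih]; simp
      · rw [ih]; simp [h]; ring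

theorem card_insert_erase (v : Int) (s : Finset Int) :
    (insert v s).card = (s.erase v).card + 1 := by
  by_cases h : v ∈ s
  · rw [Finset.insert_eq_self.2 h, Finset.card_erase_of_mem h]
    have := Finset.card_pos.2 ⟨v, h⟩
    omega
  · rw [Finset.card_insert_of_notMem h, Finset.erase_eq_of_notMem h]

theorem countAux_some_sorted (s : List Int) (hs : s.Pairwise (· ≤ ·)) (p : Int)
    (hp : ∀ x ∈ s, p ≤ x) : countAux (some p) s = (s.toFinset.erase p).card := by
  induction s generalizing p with
  | nil => simp [countAux]
  | cons v t ih =>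
    obtain ⟨hv, ht⟩ := List.pairwise_cons.1 hs
    have hihv := ih ht v hv
    simp only [countAux, List.toFinset_cons]
    by_cases h : p = v
    · subst h
      rw [if_pos rfl, Finset.erase_insert_eq_erase, hihv]
      omega
    · have hplt : p < v := lt_of_le_of_ne (hp v (by simp)) h
      have hpnot : p ∉ insert v t.toFinset := by
        simp only [Finset.mem_insert, List.mem_toFinset]
        rintro (rfl | hmem)
        · exact h rfl
        · exact absurd (hv p hmem) (not_le.2 hplt)
      rw [if_neg (by simp [h]), Finset.erase_eq_of_notMem hpnot,
        card_insert_erase, hihv]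
      omega

theorem countAux_none_sorted (s : List Int) (hs : s.Pairwise (· ≤ ·)) :
    countAux none s = s.toFinset.card := by
  cases s with
  | nil => simp [countAux]
  | cons v t =>
    obtain ⟨hv, ht⟩ := List.pairwise_cons.1 hs
    simp only [countAux, List.toFinset_cons]
    rw [countAux_some_sorted t ht v hv, card_insert_erase, if_neg (by simp)]
    omega

theorem countRuns_sorted_eq_ofList_length (l : List Int) :
    countRuns (PySem.List.sorted l (fun x => x) false) = ((PySem.Set.ofList l).length : Int) := by
  unfold countRuns
  rw [countRuns_foldl]
  have hpw : (PySem.List.sorted l (fun x => x) false).Pairwise (· ≤ ·) := by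
    simpa using PySem.List.sorted_pairwise l (fun x => x)
  rw [countAux_none_sorted _ hpw]
  have hperm : (PySem.List.sorted l (fun x => x) false).Perm l := PySem.List.sorted_perm l _ _
  rw [List.toFinset_eq_of_perm _ _ hperm]
  have h1 : (PySem.Set.ofList l).toFinset = l.toFinset := by
    ext x; simp [PySem.Set.mem_ofList]
  rw [← h1, List.toFinset_card_of_nodup (PySem.Set.nodup_ofList l)]
  simp

-- ===== VERDICT (by name: the statement is the Claim_ definition above) =====
theorem get_num_of_classes_spec : Claim_equal_get_num_of_classes := by
  intro d _ hpre
  obtain ⟨hnd, h0, _⟩ := hpre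
  show get_num_of_classes d = get_num_of_classes_alt d
  unfold get_num_of_classes get_num_of_classes_alt
  dsimp only
  rw [PySem.List.foldl_append_singleton_eq_map, PySem.List.foldl_append_singleton_eq_map]
  simp only [List.nil_append]
  apply List.map_congr_left
  intro tp_idx _
  rw [List.map_map]
  have hcols : d.map ((fun r => PySem.List.pyGetD r tp_idx 0) ∘ Prod.snd)
      = d.map (fun p => PySem.List.pyGetD (pyLookup d p.1) tp_idx 0) := by
    apply List.map_congr_left
    intro p hp
    simp only [Function.comp]
    rw [pyLookup_self d hnd p hp]
  rw [hcols, countRuns_sorted_eq_ofList_length]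
  rw [← PySem.Set.update_map_eq_foldl_add, PySem.Set.update_nil_left]
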